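-- pv_equiv track=rewrite | github.com/JamesTheAwesomeDude/ex-hilbertcurve | reference.py | _gray_encode_b
-- ===== SOURCE A (Python) =====
-- def _gray_encode_b(x, m):
-- 	n = len(x)
-- 	t = 0
-- 	q = 1 << (m - 1)
-- 	while q > 1:
-- 		p = q - 1
-- 		if x[n-1] & q:
-- 			t ^= p
-- 		q >>= 1
-- 	return t
-- ===== SOURCE B (Python) =====
-- def _gray_encode_b(x, m):
-- 	mask = (1 << (m - 1)) - 1
-- 	if mask == 0:
-- 		return 0
-- 	# drop bit 0, keep bits 0..m-2 (originally bits 1..m-1)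
-- 	y = (x[-1] >> 1) & mask
-- 	# parallel suffix-XOR: bit i of y becomes the XOR of bits i.. of y
-- 	s = 1
-- 	while s < m - 1:
-- 		y ^= y >> s
-- 		s <<= 1
-- 	return y
-- ===== Notes on version B (the rewrite author's own statement) =====
-- stated objective: faster
-- what changed: A clears one code bit per iteration, looping over all m-1 bit positions q = 2^(m-1)..2; B masks the shifted last coordinate once and computes the same suffix-XOR with a parallel-prefix bit hack (y ^= y >> s with s doubling), needing only O(log m) big-int operations.
import Mathlib
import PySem

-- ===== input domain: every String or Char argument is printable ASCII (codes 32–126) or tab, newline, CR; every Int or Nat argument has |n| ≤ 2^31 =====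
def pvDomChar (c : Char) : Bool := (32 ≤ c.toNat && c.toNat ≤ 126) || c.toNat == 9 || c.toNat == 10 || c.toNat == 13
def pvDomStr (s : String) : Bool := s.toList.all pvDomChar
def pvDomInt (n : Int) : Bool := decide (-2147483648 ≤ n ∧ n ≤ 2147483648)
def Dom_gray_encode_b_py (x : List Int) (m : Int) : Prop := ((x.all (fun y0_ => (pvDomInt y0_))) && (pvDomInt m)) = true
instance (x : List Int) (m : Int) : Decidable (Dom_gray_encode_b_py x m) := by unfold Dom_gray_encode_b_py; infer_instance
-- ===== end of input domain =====

-- B replaces A's O(m) per-bit loop over q = 2^(m-1) … 2 by an O(log m)-step parallel suffix-XOR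
-- ("bit hack") on the masked shifted last element; equivalence of the return values is proved below.

-- ===== PORT A =====
-- while q > 1: p = q-1; if x[n-1] & q: t ^= p; q >>= 1
def grayLoopA (x : List Int) (n t q : Int) : Int :=
  if _h : 1 < q then
    grayLoopA x n
      (if PySem.Int.band (PySem.List.pyGetD x (n - 1) 0) q ≠ 0 then PySem.Int.bxor t (q - 1) else t)
      (q >>> (1 : Nat))
  else t
termination_by q.toNat
decreasing_by simp only [Int.shiftRight_eq_div_pow, pow_one]; omega

def gray_encode_b_py (x : List Int) (m : Int) : Int :=
  grayLoopA x (PySem.List.len x) 0 ((1 : Int) <<< (m - 1).toNat)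

-- ===== PORT B =====
-- while s < m-1: y ^= y >> s; s <<= 1   (the '0 < s' conjunct is only a totality guard:
-- B's Python always has s ≥ 1 here)
def grayLoopB (m y s : Int) : Int :=
  if _h : 0 < s ∧ s < m - 1 then grayLoopB m (PySem.Int.bxor y (y >>> s.toNat)) (s <<< (1 : Nat))
  else y
termination_by (m - 1 - s).toNat
decreasing_by simp only [Int.shiftLeft_eq, pow_one]; omega

def gray_encode_b_py_alt (x : List Int) (m : Int) : Int :=
  let mask := ((1 : Int) <<< (m - 1).toNat) - 1
  if mask = 0 then 0
  else grayLoopB m (PySem.Int.band (PySem.List.pyGetD x (-1) 0 >>> (1 : Nat)) mask) 1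

-- ===== PRECONDITION & SPEC =====
-- A raises ValueError (negative shift) for m ≤ 0 and IndexError for x = [] with m ≥ 2.
def Pre_gray_encode_b_py (x : List Int) (m : Int) : Prop := 1 ≤ m ∧ (m = 1 ∨ x ≠ [])
instance (x : List Int) (m : Int) : Decidable (Pre_gray_encode_b_py x m) := by
  unfold Pre_gray_encode_b_py; infer_instance
def pvWitness_gray_encode_b_py : List Int × Int := ([5], 3)

def Spec_gray_encode_b_py (x : List Int) (m : Int) (out : Int) : Prop := out = gray_encode_b_py_alt x m
instance (x : List Int) (m : Int) (out : Int) : Decidable (Spec_gray_encode_b_py x m out) := by unfold Spec_gray_encode_b_py; infer_instance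

-- ===== CLAIM (what is proved, stated in full; the proofs are below) =====
def Claim_equal_gray_encode_b_py : Prop := ∀ (x : List Int) (m : Int), Dom_gray_encode_b_py x m → Pre_gray_encode_b_py x m → Spec_gray_encode_b_py x m (gray_encode_b_py x m)

-- ===== LEMMAS AND PROOFS =====

-- xor of f over the window [i, i+s)
def pvWin (f : Nat → Bool) (i : Nat) : Nat → Bool
  | 0 => false
  | s+1 => xor (f (i + s)) (pvWin f i s)

lemma pvWin_add (f : Nat → Bool) (i s t : Nat) :
    pvWin f i (s + t) = xor (pvWin f i s) (pvWin f (i + s) t) := by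
  induction t with
  | zero => simp [pvWin]
  | succ t ih =>
      show pvWin f i (s + t + 1) = _
      simp [pvWin, ih, Bool.xor_comm, Nat.add_assoc]

lemma pvWin_false (f : Nat → Bool) (i : Nat) (h : ∀ j, i ≤ j → f j = false) :
    ∀ s, pvWin f i s = false := by
  intro s
  induction s with
  | zero => rfl
  | succ s ih => simp [pvWin, ih, h (i + s) (Nat.le_add_right _ _)]

lemma pvWin_congr (f g : Nat → Bool) (i : Nat) (s : Nat)
    (h : ∀ j, i ≤ j → j < i + s → f j = g j) : pvWin f i s = pvWin g i s := by
  induction s with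
  | zero => rfl
  | succ s ih =>
      simp [pvWin, h (i + s) (Nat.le_add_right _ _) (by omega),
        ih (fun j h1 h2 => h j h1 (by omega))]

-- the value A accumulates: xor of (2^j - 1) over the set bits j = 1..k
def pvFA (f : Nat → Bool) : Nat → Nat
  | 0 => 0
  | k+1 => pvFA f k ^^^ (if f (k+1) then 2^(k+1) - 1 else 0)

lemma pvFA_testBit (f : Nat → Bool) (k i : Nat) :
    (pvFA f k).testBit i = pvWin (fun j => f (j + 1)) i (k - i) := by
  induction k with
  | zero => simp [pvFA, pvWin]
  | succ k ih =>
      have h2 : (if f (k+1) then 2^(k+1) - 1 else 0).testBit i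
          = (f (k+1) && decide (i < k + 1)) := by
        by_cases h : f (k+1) <;> simp [h, Nat.testBit_two_pow_sub_one]
      rw [pvFA, Nat.testBit_xor, ih, h2]
      by_cases hik : i ≤ k
      · have he1 : k + 1 - i = (k - i) + 1 := by omega
        rw [he1]
        show _ = xor (f (i + (k - i) + 1)) _
        have he2 : i + (k - i) + 1 = k + 1 := by omega
        rw [he2, decide_eq_true (by omega : i < k + 1)]
        cases f (k+1) <;> simp [Bool.xor_comm]
      · have h1 : k - i = 0 := by omega
        have h3 : k + 1 - i = 0 := by omega
        rw [h1, h3, decide_eq_false (by omega : ¬ i < k + 1)]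
        simp [pvWin]

-- mask-complement: 2^M - 1 - e is the bitwise xor with the mask
lemma pvMaskSubXor : ∀ (M : Nat) (e : Nat), e < 2^M → 2^M - 1 - e = (2^M - 1) ^^^ e := by
  intro M
  induction M with
  | zero => intro e he; interval_cases e; rfl
  | succ M ih =>
      intro e he
      have hq : e / 2 < 2^M := by omega
      have hmod : ∀ x y : Nat, (x ^^^ y) % 2 = (x % 2) ^^^ (y % 2) := by
        intro x y
        have := Nat.testBit_xor x y 0
        simp only [Nat.testBit_zero] at this
        rcases Nat.mod_two_eq_zero_or_one x with h1|h1 <;>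
          rcases Nat.mod_two_eq_zero_or_one y with h2|h2 <;>
            simp [h1, h2] at this ⊢ <;> omega
      have hdiv := Nat.xor_div_two (a := 2^(M+1) - 1) (b := e)
      have hmd := hmod (2^(M+1) - 1) e
      have hP : (0:Nat) < 2^M := Nat.two_pow_pos M
      have hhalf : (2^(M+1) - 1) / 2 = 2^M - 1 := by omega
      have hm2 : (2^(M+1) - 1) % 2 = 1 := by omega
      rw [hhalf] at hdiv
      rw [← ih (e/2) hq] at hdiv
      rw [hm2] at hmd
      have hbit : (1 : Nat) ^^^ (e % 2) = 1 - e % 2 := by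
        rcases Nat.mod_two_eq_zero_or_one e with h|h <;> simp [h]
      rw [hbit] at hmd
      have hx := Nat.div_add_mod ((2^(M+1) - 1) ^^^ e) 2
      omega

-- A's loop computes pvFA of the bit predicate of x[n-1]
lemma grayLoopA_char (x : List Int) (n : Int) (β : Nat → Bool)
    (h1 : ∀ j, 1 ≤ j →
      (PySem.Int.band (PySem.List.pyGetD x (n - 1) 0) (((2^j : Nat) : Int)) ≠ 0 ↔ β j = true)) :
    ∀ (k : Nat) (tn : Nat),
      grayLoopA x n (tn : Int) (((2^k : Nat) : Int)) = ((tn ^^^ pvFA β k : Nat) : Int) := by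
  intro k
  induction k with
  | zero => intro tn; rw [grayLoopA.eq_def]; norm_num [pvFA]
  | succ k ih =>
      intro tn
      rw [grayLoopA.eq_def]
      have hq : (1 : Int) < ((2^(k+1) : Nat) : Int) := by
        have : (2:Nat) ≤ 2^(k+1) := Nat.one_lt_two_pow (by omega)
        exact_mod_cast this
      rw [dif_pos hq]
      have hshift : (((2^(k+1) : Nat) : Int)) >>> (1:Nat) = ((2^k : Nat) : Int) := by
        rw [Int.shiftRight_eq_div_pow]
        have : (2^(k+1) : Nat) = 2^k * 2 := by rw [Nat.pow_succ]
        rw [this]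
        push_cast
        omega
      have hsub : (((2^(k+1) : Nat) : Int)) - 1 = (((2^(k+1) - 1 : Nat)) : Int) := by
        have : (1:Nat) ≤ 2^(k+1) := Nat.one_le_two_pow
        push_cast [this]; ring
      by_cases hb : β (k+1) = true
      · rw [if_pos ((h1 (k+1) (by omega)).mpr hb), hsub, PySem.Int.bxor_natCast, hshift, ih]
        congr 1
        simp [pvFA, hb, Nat.xor_comm, Nat.xor_left_comm]
      · rw [if_neg (fun hcon => hb ((h1 (k+1) (by omega)).mp hcon)), hshift, ih]
        congr 1
        simp [pvFA, Bool.eq_false_iff.mpr hb]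

-- B's loop keeps the invariant "bit i of y = xor of bf over [i, i+s)" and, once s ≥ M,
-- its value is the number R whose bit i is the xor of bf over [i, i+M)
lemma grayLoopB_char (m : Int) (M : Nat) (hm : m - 1 = (M : Int)) (bf : Nat → Bool)
    (hbf : ∀ j, M ≤ j → bf j = false) (R : Nat) (hR : ∀ i, R.testBit i = pvWin bf i M) :
    ∀ (fuel : Nat) (s : Int) (yn : Nat), (m - 1 - s).toNat = fuel → 1 ≤ s →
      (∀ i, yn.testBit i = pvWin bf i s.toNat) → grayLoopB m (yn : Int) s = (R : Int) := by
  intro fuel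
  induction fuel using Nat.strong_induction_on with
  | _ fuel ih =>
      intro s yn hfuel hs hinv
      rw [grayLoopB.eq_def]
      by_cases hc : 0 < s ∧ s < m - 1
      · rw [dif_pos hc]
        have hsh : ((yn : Int)) >>> s.toNat = ((yn >>> s.toNat : Nat) : Int) :=
          Int.natCast_shiftRight yn s.toNat
        have hsl : s <<< (1:Nat) = 2 * s := by
          simp [Int.shiftLeft_eq, pow_one, Int.mul_comm]
        rw [hsh, PySem.Int.bxor_natCast, hsl]
        refine ih ((m - 1 - 2*s).toNat) (by omega) (2*s) _ rfl (by omega) ?_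
        intro i
        have h2s : (2*s).toNat = s.toNat + s.toNat := by omega
        rw [Nat.testBit_xor, hinv i, Nat.testBit_shiftRight, hinv (s.toNat + i), h2s,
          pvWin_add]
        rw [Nat.add_comm s.toNat i]
      · rw [dif_neg hc]
        have hsM : M ≤ s.toNat := by omega
        congr 1
        apply Nat.eq_of_testBit_eq
        intro i
        rw [hinv i, hR i]
        have : s.toNat = M + (s.toNat - M) := by omega
        rw [this, pvWin_add, pvWin_false bf (i + M) (fun j hj => hbf j (by omega))]
        simp

-- the two characterisations agree: pvFA β M is exactly the R of grayLoopB_char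
lemma pvFA_win (β : Nat → Bool) (M i : Nat) :
    (pvFA β M).testBit i = pvWin (fun j => decide (j < M) && β (j + 1)) i M := by
  rw [pvFA_testBit]
  by_cases hi : i ≤ M
  · have hMs : pvWin (fun j => decide (j < M) && β (j + 1)) i M
        = pvWin (fun j => decide (j < M) && β (j + 1)) i ((M - i) + i) := by
      congr 1; omega
    rw [hMs, pvWin_add, pvWin_false (fun j => decide (j < M) && β (j + 1)) (i + (M - i))
      (fun j hj => by simp [decide_eq_false (by omega : ¬ j < M)])]
    rw [pvWin_congr (fun j => β (j+1)) (fun j => decide (j < M) && β (j + 1)) i (M - i)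
      (fun j h1 h2 => by simp [decide_eq_true (by omega : j < M)])]
    simp
  · have h0 : M - i = 0 := by omega
    rw [h0]
    rw [pvWin_false (fun j => decide (j < M) && β (j + 1)) i
      (fun j hj => by simp [decide_eq_false (by omega : ¬ j < M)])]
    rfl

-- master equivalence for m ≥ 2, abstracted over the bit predicate β of the last element
lemma pvMain (x : List Int) (m : Int) (M : Nat) (hM : 1 ≤ M) (hm : m - 1 = (M : Int))
    (β : Nat → Bool)
    (h1 : ∀ j, 1 ≤ j →
      (PySem.Int.band (PySem.List.pyGetD x (PySem.List.len x - 1) 0) (((2^j : Nat) : Int)) ≠ 0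
        ↔ β j = true))
    (b : Nat)
    (hb : PySem.Int.band (PySem.List.pyGetD x (-1) 0 >>> (1:Nat)) (((2^M - 1 : Nat)) : Int)
        = (b : Int))
    (hbbit : ∀ i, b.testBit i = (decide (i < M) && β (i + 1))) :
    gray_encode_b_py x m = gray_encode_b_py_alt x m := by
  have hpow : (1 : Int) <<< (m - 1).toNat = ((2^M : Nat) : Int) := by
    have : (m - 1).toNat = M := by omega
    rw [this, Int.shiftLeft_eq]
    push_cast
    ring
  have hmask : ((1 : Int) <<< (m - 1).toNat) - 1 = (((2^M - 1 : Nat)) : Int) := by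
    rw [hpow]
    have h1 : (1:Nat) ≤ 2^M := Nat.one_le_two_pow
    push_cast [h1]
    ring
  have hne : (((2^M - 1 : Nat)) : Int) ≠ 0 := by
    have h2 : (2:Nat) ≤ 2^M := by
      calc (2:Nat) = 2^1 := rfl
      _ ≤ 2^M := Nat.pow_le_pow_right (by omega) hM
    exact Int.natCast_ne_zero.mpr (by omega)
  rw [gray_encode_b_py, gray_encode_b_py_alt]
  show grayLoopA _ _ _ _ = if ((1 : Int) <<< (m - 1).toNat) - 1 = 0 then 0 else _
  rw [hmask, if_neg hne, hpow, hb]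
  have hA := grayLoopA_char x (PySem.List.len x) β h1 M 0
  simp only [Nat.zero_xor, Nat.cast_zero] at hA
  rw [hA]
  exact (grayLoopB_char m M hm (fun j => decide (j < M) && β (j + 1))
    (fun j hj => by simp [decide_eq_false (by omega : ¬ j < M)])
    (pvFA β M) (fun i => pvFA_win β M i)
    (m - 2).toNat 1 b (by omega) (by omega)
    (fun i => by rw [hbbit i]; show _ = pvWin _ i 1; simp [pvWin])).symm

-- ===== VERDICT (by name: the statement is the Claim_ definition above) =====
theorem gray_encode_b_py_spec : Claim_equal_gray_encode_b_py := by
  intro x m hdom hpre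
  unfold Spec_gray_encode_b_py
  obtain ⟨hm1, hpre⟩ := hpre
  by_cases hm2 : m ≤ 1
  · -- m = 1: A's loop starts at q = 1 and exits at once; B returns 0 directly
    have hm : m = 1 := by omega
    subst hm
    have halt : gray_encode_b_py_alt x 1 = 0 := by
      rw [gray_encode_b_py_alt]
      norm_num [Int.shiftLeft_eq]
    rw [halt, gray_encode_b_py]
    norm_num
    rw [grayLoopA.eq_def]
    norm_num
  · have hx : x ≠ [] := by
      rcases hpre with h | h
      · omega
      · exact h
    obtain ⟨a, ha1, ha2⟩ : ∃ a, PySem.List.pyGetD x (PySem.List.len x - 1) 0 = a ∧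
        PySem.List.pyGetD x (-1) 0 = a := by
      refine ⟨x.getLast hx, ?_, PySem.List.pyGetD_neg_one x 0 hx⟩
      have hlen : 1 ≤ x.length := List.length_pos_iff.mpr hx
      have hc : PySem.List.len x - 1 = ((x.length - 1 : Nat) : Int) := by
        rw [PySem.List.len_eq]; omega
      rw [hc, PySem.List.pyGetD_natCast,
        List.getD_eq_getElem x 0 (by omega : x.length - 1 < x.length),
        List.getLast_eq_getElem]
    set M : Nat := (m - 1).toNat with hMdef
    have hM : 1 ≤ M := by omega
    have hm : m - 1 = (M : Int) := by omega
    have hmask : ((1 : Int) <<< (m - 1).toNat) - 1 = (((2^M - 1 : Nat)) : Int) := by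
      rw [← hMdef, Int.shiftLeft_eq]
      have h1 : (1:Nat) ≤ 2^M := Nat.one_le_two_pow
      push_cast [h1]
      ring
    have hmask' : (((2^M : Nat) : Int)) - 1 = (((2^M - 1 : Nat)) : Int) := by
      have h1 : (1:Nat) ≤ 2^M := Nat.one_le_two_pow
      push_cast [h1]
      ring
    -- both ports read the same last element a; case on its sign (two's-complement bits)
    cases a with
    | ofNat n =>
        refine pvMain x m M hM hm (fun j => n.testBit j) ?_
          ((n >>> 1) &&& (2^M - 1)) ?_ ?_
        · intro j hj
          rw [ha1]
          have : (Int.ofNat n) = ((n : Nat) : Int) := rfl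
          rw [this, PySem.Int.band_natCast]
          rcases htb : n.testBit j with _ | _ <;>
            simp [Nat.and_two_pow, htb]
        · rw [ha2]
          have : (Int.ofNat n) = ((n : Nat) : Int) := rfl
          rw [this, ← Int.natCast_shiftRight, PySem.Int.band_natCast]
        · intro i
          rw [Nat.testBit_and, Nat.testBit_shiftRight, Nat.testBit_two_pow_sub_one]
          rw [Nat.add_comm 1 i, Bool.and_comm]
    | negSucc c =>
        have hns : ∀ d : Nat, -(Int.negSucc d) - 1 = ((d : Nat) : Int) := by
          intro d
          rw [Int.negSucc_eq]
          ring
        refine pvMain x m M hM hm (fun j => ! c.testBit j) ?_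
          (2^M - 1 - ((c >>> 1) % 2^M)) ?_ ?_
        · intro j hj
          rw [ha1]
          show PySem.Int.band (Int.negSucc c) _ ≠ 0 ↔ _
          rw [PySem.Int.band]
          rw [if_neg (not_le_of_gt (Int.negSucc_lt_zero c)),
            if_pos (by positivity : (0:Int) ≤ ((2^j : Nat) : Int)), hns]
          rw [Int.toNat_natCast, Int.toNat_natCast]
          have hand : 2^j &&& c = (c.testBit j).toNat * 2^j := by
            rw [Nat.and_comm]; exact Nat.and_two_pow c j
          rcases htb : c.testBit j with _ | _ <;>
            simp [hand, htb]
        · rw [ha2]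
          show PySem.Int.band (Int.negSucc c >>> (1:Nat)) _ = _
          rw [Int.negSucc_shiftRight, PySem.Int.band]
          rw [if_neg (not_le_of_gt (Int.negSucc_lt_zero (c >>> 1))),
            if_pos (by positivity : (0:Int) ≤ (((2^M - 1 : Nat)) : Int)), hns]
          rw [Int.toNat_natCast, Int.toNat_natCast]
          have hand : (2^M - 1) &&& (c >>> 1) = (c >>> 1) % 2^M := by
            rw [Nat.and_comm]; exact Nat.and_two_pow_sub_one_eq_mod (c >>> 1) M
          rw [hand]
        · intro i
          have hlt : (c >>> 1) % 2^M < 2^M := Nat.mod_lt _ (Nat.two_pow_pos M)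
          rw [pvMaskSubXor M _ hlt, Nat.testBit_xor, Nat.testBit_two_pow_sub_one,
            Nat.testBit_mod_two_pow, Nat.testBit_shiftRight, Nat.add_comm 1 i]
          by_cases hiM : i < M
          · rcases htb : c.testBit (i + 1) with _ | _ <;> simp [hiM, htb]
          · simp [hiM]
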